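-- pv_equiv track=rewrite | github.com/MrBrantCode/unitest_baseline | mut_generate/mist_train_taco/taco_4369/solution.py | min_days_to_make_street_beautiful
-- ===== SOURCE A (Python) =====
-- def min_days_to_make_street_beautiful(n, k, colors):
--     from collections import Counter
--
--     if k == 1:
--         return n - max(Counter(colors).values())
--
--     unique_colors = set(colors)
--     min_days = 10 ** 5  # Initialize with a large number
--
--     for color in unique_colors:
--         days = 0
--         i = 0
--         while i < n:
--             if colors[i] != color:
--                 i += k
--                 days += 1
--             else:
--                 i += 1
--         min_days = min(min_days, days)
--
--     return min_days
-- ===== SOURCE B (Python) =====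
-- def min_days_to_make_street_beautiful(n, k, colors):
--     from collections import Counter
--
--     if k == 1:
--         return n - max(Counter(colors).values())
--
--     positions = {}
--     for i in range(n):
--         positions.setdefault(colors[i], []).append(i)
--
--     min_days = 10 ** 5
--     for color in set(colors):
--         idxs = positions.get(color, [])
--         days = 0
--         last = 0   # first index not yet covered by a repaint window
--         prev = -1  # previous match index processed (-1 before the first)
--         for m in idxs + [n]:
--             # maximal mismatch segment between consecutive matches: [prev+1, m-1]
--             start = max(prev + 1, last)
--             if start <= m - 1:
--                 cnt = -((start - m) // k)  # ceil((m - start) / k)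
--                 days += cnt
--                 last = start + cnt * k
--             prev = m
--         min_days = min(min_days, days)
--     return min_days
-- ===== Notes on version B (the rewrite author's own statement) =====
-- stated objective: alternative
-- what changed: A greedily rescans the whole street cell by cell for every distinct color; B builds a color->positions index in one pass and, per color, walks only the mismatch segments between consecutive matching positions, adding ceil(gap/k) windows per segment while threading the last-covered index across gaps.
-- outside the precondition, e.g. on min_days_to_make_street_beautiful(2, 0, [1, 1]): A returns 0, B returns 0; on min_days_to_make_street_beautiful(4, 5, [1, 2]): A returns 1, B raises IndexError
import Mathlib
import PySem

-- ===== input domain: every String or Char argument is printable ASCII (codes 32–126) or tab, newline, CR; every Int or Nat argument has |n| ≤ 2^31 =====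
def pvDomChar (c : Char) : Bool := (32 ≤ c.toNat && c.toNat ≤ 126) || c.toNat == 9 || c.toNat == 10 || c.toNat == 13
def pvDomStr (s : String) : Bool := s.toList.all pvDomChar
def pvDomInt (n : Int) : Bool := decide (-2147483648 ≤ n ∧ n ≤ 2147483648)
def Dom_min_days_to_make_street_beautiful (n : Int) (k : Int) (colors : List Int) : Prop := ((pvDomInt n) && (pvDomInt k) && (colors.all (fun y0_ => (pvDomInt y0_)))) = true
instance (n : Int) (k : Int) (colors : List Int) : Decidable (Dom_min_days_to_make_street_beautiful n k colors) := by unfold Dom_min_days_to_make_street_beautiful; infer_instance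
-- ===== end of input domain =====

-- B replaces A's per-color cell-by-cell rescan of the street by a one-pass color->positions
-- index plus a per-color walk over the mismatch segments between consecutive matching
-- positions (ceil(gap/k) windows per segment, threading the last-covered index): alternative
-- algorithm, same return value on Pre_.

-- ===== PORT A =====
-- A's while loop 'while i < n: …' as fuel recursion; fuel n.toNat suffices because under
-- Pre_ (k ≥ 2) i strictly increases each iteration.  colors[i] is ported as pyGetD colors i 0:
-- exact whenever 0 ≤ i < len(colors); Pre_ confines the scan to that range.
def pvA_scan (n k : Int) (L : List Int) (c : Int) : Nat → Int → Int → Int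
  | 0, _, days => days
  | fuel + 1, i, days =>
    if i < n then
      if PySem.List.pyGetD L i 0 ≠ c then pvA_scan n k L c fuel (i + k) (days + 1)
      else pvA_scan n k L c fuel (i + 1) days
    else days

def min_days_to_make_street_beautiful (n : Int) (k : Int) (colors : List Int) : Int :=
  if k == 1 then
    n - ((PySem.List.max? (PySem.Dict.counter colors).values (fun x => x)).getD 0)
  else
    (PySem.Set.ofList colors).foldl
      (fun min_days color => min min_days (pvA_scan n k colors color n.toNat 0 0)) (10 ^ 5)

-- ===== PORT B =====
-- positions.setdefault(colors[i], []).append(i) over range(n)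
def pvB_positions (n : Int) (colors : List Int) : PySem.Dict Int (List Int) :=
  (PySem.List.pyRange 0 n 1).foldl
    (fun d i => d.modify (PySem.List.pyGetD colors i 0) [] (fun l => l ++ [i])) PySem.Dict.empty

-- the per-color walk over idxs + [n] carrying (prev, last, days)
def pvB_walk (k : Int) : List Int → Int → Int → Int → Int
  | [], _, _, days => days
  | m :: rest, prev, last, days =>
    let start := max (prev + 1) last
    if start ≤ m - 1 then
      let cnt := -(PySem.Int.floordiv (start - m) k)
      pvB_walk k rest m (start + cnt * k) (days + cnt)
    else
      pvB_walk k rest m last days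

def min_days_to_make_street_beautiful_alt (n : Int) (k : Int) (colors : List Int) : Int :=
  if k == 1 then
    n - ((PySem.List.max? (PySem.Dict.counter colors).values (fun x => x)).getD 0)
  else
    let positions := pvB_positions n colors
    (PySem.Set.ofList colors).foldl
      (fun min_days color =>
        min min_days (pvB_walk k (positions.getD color [] ++ [n]) (-1) 0 0)) (10 ^ 5)

-- ===== PRECONDITION & SPEC =====
-- Pre_ excludes exactly the inputs where Python A does not return normally: ValueError (k = 1
-- with empty colors), divergence (k ≤ 0 with 0 < n and a mismatching cell), IndexError (the
-- scan indexes past len(colors) when n > len(colors)); it is slightly narrower than that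
-- raising set — for 0 < n it also drops all k ≤ 0 and all n > len(colors) even where A
-- happens to return (see cites).
def Pre_min_days_to_make_street_beautiful (n : Int) (k : Int) (colors : List Int) : Prop :=
  (k = 1 ∧ colors ≠ []) ∨ (k ≠ 1 ∧ (0 < n → (2 ≤ k ∧ n ≤ (colors.length : Int))))
instance (n : Int) (k : Int) (colors : List Int) : Decidable (Pre_min_days_to_make_street_beautiful n k colors) := by unfold Pre_min_days_to_make_street_beautiful; infer_instance

def pvWitness_min_days_to_make_street_beautiful : Int × Int × List Int := (3, 2, [1, 2, 1])

def Spec_min_days_to_make_street_beautiful (n : Int) (k : Int) (colors : List Int) (out : Int) : Prop := out = min_days_to_make_street_beautiful_alt n k colors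
instance (n : Int) (k : Int) (colors : List Int) (out : Int) : Decidable (Spec_min_days_to_make_street_beautiful n k colors out) := by unfold Spec_min_days_to_make_street_beautiful; infer_instance

-- ===== CLAIM (what is proved, stated in full; the proofs are below) =====
def Claim_equal_min_days_to_make_street_beautiful : Prop := ∀ (n : Int) (k : Int) (colors : List Int), Dom_min_days_to_make_street_beautiful n k colors → Pre_min_days_to_make_street_beautiful n k colors → Spec_min_days_to_make_street_beautiful n k colors (min_days_to_make_street_beautiful n k colors)

-- ===== LEMMAS AND PROOFS =====

-- the scan is already finished when i ≥ n
lemma pvA_scan_ge (n k : Int) (L : List Int) (c : Int) (fuel : Nat) (i days : Int)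
    (h : n ≤ i) : pvA_scan n k L c fuel i days = days := by
  cases fuel with
  | zero => rfl
  | succ f => simp [pvA_scan, show ¬ i < n by omega]

-- any fuel at least (n - i).toNat computes the same value (k ≥ 1)
lemma pvA_scan_fuel (n k : Int) (L : List Int) (c : Int) (hk : 1 ≤ k) :
    ∀ (f1 : Nat) (f2 : Nat) (i days : Int), (n - i).toNat ≤ f1 → (n - i).toNat ≤ f2 →
      pvA_scan n k L c f1 i days = pvA_scan n k L c f2 i days := by
  intro f1
  induction f1 with
  | zero =>
    intro f2 i days h1 h2
    have : n ≤ i := by omega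
    rw [pvA_scan_ge n k L c 0 i days this, pvA_scan_ge n k L c f2 i days this]
  | succ f ih =>
    intro f2 i days h1 h2
    by_cases hi : i < n
    · cases f2 with
      | zero => omega
      | succ f2' =>
        simp only [pvA_scan, if_pos hi]
        by_cases hc : PySem.List.pyGetD L i 0 ≠ c
        · simp only [if_pos hc]
          exact ih f2' (i + k) (days + 1) (by omega) (by omega)
        · simp only [if_neg hc]
          exact ih f2' (i + 1) days (by omega) (by omega)
    · rw [pvA_scan_ge n k L c _ i days (by omega), pvA_scan_ge n k L c f2 i days (by omega)]

-- ceiling bracket for cnt = -((p - m) // k)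
lemma pv_cnt_bracket (k m p : Int) (hk : 1 ≤ k) :
    (-(PySem.Int.floordiv (p - m) k) - 1) * k < m - p ∧
      m - p ≤ -(PySem.Int.floordiv (p - m) k) * k := by
  have h1 : p - m = -(m - p) := by ring
  rw [h1]
  exact (PySem.Int.neg_floordiv_neg_eq_iff_of_pos (by omega)).mp rfl

-- the jump lemma: across a pure-mismatch stretch [p, m) the scan takes exactly
-- cnt = ceil((m - p)/k) steps and lands at p + cnt*k
lemma pvA_scan_jump (n k : Int) (L : List Int) (c : Int) (hk : 1 ≤ k) (m : Int) :
    ∀ (d : Nat) (p days : Int), (m - p).toNat = d → p < m → m ≤ n →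
      (∀ j, p ≤ j → j < m → PySem.List.pyGetD L j 0 ≠ c) →
      pvA_scan n k L c ((n - p).toNat) p days =
        pvA_scan n k L c ((n - (p + (-(PySem.Int.floordiv (p - m) k)) * k)).toNat)
          (p + (-(PySem.Int.floordiv (p - m) k)) * k)
          (days + (-(PySem.Int.floordiv (p - m) k))) := by
  intro d
  induction d using Nat.strong_induction_on with
  | _ d ih =>
    intro p days hd hpm hmn hmis
    have hpn : p < n := by omega
    have hfuel : (n - p).toNat = ((n - p).toNat - 1) + 1 := by omega
    rw [hfuel]
    simp only [pvA_scan, if_pos hpn, if_pos (hmis p le_rfl hpm)]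
    by_cases hstep : m ≤ p + k
    · -- one window suffices; cnt = 1
      have hcnt : -(PySem.Int.floordiv (p - m) k) = 1 := by
        have h1 : p - m = -(m - p) := by ring
        rw [h1]
        exact (PySem.Int.neg_floordiv_neg_eq_iff_of_pos (by omega)).mpr (by constructor <;> nlinarith)
      rw [hcnt]
      have := pvA_scan_fuel n k L c hk ((n - p).toNat - 1) ((n - (p + 1 * k)).toNat) (p + k) (days + 1) (by omega) (by omega)
      simpa [one_mul] using this
    · -- recurse with p + k
      have hb := pv_cnt_bracket k m (p + k) hk
      set cnt' := -(PySem.Int.floordiv (p + k - m) k) with hcnt'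
      have hcnt : -(PySem.Int.floordiv (p - m) k) = cnt' + 1 := by
        have h1 : p - m = -(m - p) := by ring
        rw [h1]
        refine (PySem.Int.neg_floordiv_neg_eq_iff_of_pos (by omega)).mpr ?_
        constructor <;> nlinarith [hb.1, hb.2]
      have hrec := ih ((m - (p + k)).toNat) (by omega) (p + k) (days + 1) rfl (by omega) hmn
        (fun j hj1 hj2 => hmis j (by omega) hj2)
      have hfe := pvA_scan_fuel n k L c hk ((n - p).toNat - 1) ((n - (p + k)).toNat) (p + k) (days + 1) (by omega) (by omega)
      rw [hfe, hrec, hcnt]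
      have harg : p + k + cnt' * k = p + (cnt' + 1) * k := by ring
      have hdays : days + 1 + cnt' = days + (cnt' + 1) := by ring
      rw [harg, hdays]

-- main invariant: the segment walk over the remaining match indices (terminated by n)
-- computes exactly what A's scan computes from position max(prev+1, last)
lemma pvB_walk_eq_scan (n k : Int) (L : List Int) (c : Int) (hk : 1 ≤ k) :
    ∀ (ms : List Int) (prev last days : Int),
      (∀ x ∈ ms, prev < x ∧ x ≤ n) →
      ms.Pairwise (· < ·) →
      n ∈ ms →
      (∀ j, prev < j → j < n → (j ∈ ms ↔ PySem.List.pyGetD L j 0 = c)) →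
      pvA_scan n k L c ((n - max (prev + 1) last).toNat) (max (prev + 1) last) days =
        pvB_walk k ms prev last days := by
  intro ms
  induction ms with
  | nil => intro prev last days _ _ hn _; simp at hn
  | cons m rest ih =>
    intro prev last days hbound hpair hnmem hmatch
    have hm := hbound m (List.mem_cons_self ..)
    have hrest_gt : ∀ x ∈ rest, m < x := by
      intro x hx; exact (List.pairwise_cons.mp hpair).1 x hx
    set p := max (prev + 1) last with hp
    by_cases hseg : p ≤ m - 1
    · -- nonempty mismatch segment [p, m-1]
      have hmis : ∀ j, p ≤ j → j < m → PySem.List.pyGetD L j 0 ≠ c := by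
        intro j hj1 hj2 hcj
        have hjn : j < n := by omega
        have hjm : j ∈ m :: rest := (hmatch j (by omega) hjn).mpr hcj
        rcases List.mem_cons.mp hjm with h | h
        · omega
        · have := hrest_gt j h; omega
      set cnt := -(PySem.Int.floordiv (p - m) k) with hcntdef
      have hb := pv_cnt_bracket k m p hk
      rw [← hcntdef] at hb
      have hland : m ≤ p + cnt * k := by omega
      have hjump := pvA_scan_jump n k L c hk m ((m - p).toNat) p days rfl (by omega) hm.2 hmis
      rw [← hcntdef] at hjump
      simp only [pvB_walk, ← hp, if_pos hseg, ← hcntdef]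
      rw [hjump]
      by_cases hmn : m = n
      · -- final segment: rest = []
        have hrest : rest = [] := by
          cases rest with
          | nil => rfl
          | cons y t =>
            have h1 := hrest_gt y (List.mem_cons_self ..)
            have h2 := (hbound y (by simp)).2
            omega
        subst hrest
        simp only [pvB_walk]
        exact pvA_scan_ge n k L c _ _ _ (by omega)
      · -- m < n is a matching cell
        have hmlt : m < n := lt_of_le_of_ne hm.2 hmn
        have hmc : PySem.List.pyGetD L m 0 = c :=
          (hmatch m (by omega) hmlt).mp (List.mem_cons_self ..)
        have hih := ih m (p + cnt * k) (days + cnt)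
          (fun x hx => ⟨hrest_gt x hx, (hbound x (List.mem_cons_of_mem _ hx)).2⟩)
          (List.pairwise_cons.mp hpair).2
          (by
            rcases List.mem_cons.mp hnmem with h | h
            · omega
            · exact h)
          (by
            intro j hj1 hj2
            rw [← hmatch j (by omega) hj2]
            constructor
            · intro h; exact List.mem_cons_of_mem _ h
            · intro h
              rcases List.mem_cons.mp h with h | h
              · omega
              · exact h)
        rcases eq_or_lt_of_le hland with heq | hlt
        · -- landed exactly on the match m: scan steps over it
          rw [← heq] at hih ⊢
          have hmax : max (m + 1) m = m + 1 := by omega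
          rw [hmax] at hih
          rw [← hih]
          have h1 : (n - m).toNat = ((n - (m + 1)).toNat) + 1 := by omega
          rw [h1]
          simp only [pvA_scan, if_pos (show m < n by omega), hmc]
          simp
        · -- landed strictly past m
          have hmax : max (m + 1) (p + cnt * k) = p + cnt * k := by omega
          rw [hmax] at hih
          exact hih
    · -- empty segment: start > m - 1, i.e. p ≥ m
      simp only [pvB_walk, ← hp, if_neg hseg]
      have hpm : m ≤ p := by omega
      by_cases hmn : m = n
      · -- final marker reached with everything already covered: rest = []
        have hrest : rest = [] := by
          cases rest with
          | nil => rfl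
          | cons y t =>
            have h1 := hrest_gt y (List.mem_cons_self ..)
            have h2 := (hbound y (by simp)).2
            omega
        subst hrest
        simp only [pvB_walk]
        exact pvA_scan_ge n k L c _ _ _ (by omega)
      · -- m < n is a matching cell
        have hmlt : m < n := lt_of_le_of_ne hm.2 hmn
        have hmc : PySem.List.pyGetD L m 0 = c :=
          (hmatch m (by omega) hmlt).mp (List.mem_cons_self ..)
        have hih := ih m last days
          (fun x hx => ⟨hrest_gt x hx, (hbound x (List.mem_cons_of_mem _ hx)).2⟩)
          (List.pairwise_cons.mp hpair).2
          (by
            rcases List.mem_cons.mp hnmem with h | h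
            · omega
            · exact h)
          (by
            intro j hj1 hj2
            rw [← hmatch j (by omega) hj2]
            constructor
            · intro h; exact List.mem_cons_of_mem _ h
            · intro h
              rcases List.mem_cons.mp h with h | h
              · omega
              · exact h)
        by_cases hlastm : last ≤ m
        · -- the scan is sitting exactly on the match m and steps over it
          have hpm' : p = m := by omega
          have hmax : max (m + 1) last = m + 1 := by omega
          rw [hmax] at hih
          rw [← hih, hpm']
          have h1 : (n - m).toNat = ((n - (m + 1)).toNat) + 1 := by omega
          rw [h1]
          simp only [pvA_scan, if_pos (show m < n by omega), hmc]
          simp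
        · -- the match m was already covered by an earlier window: positions coincide
          have hpl : p = last := by omega
          have hmax : max (m + 1) last = last := by omega
          rw [hmax] at hih
          rw [hpl]
          exact hih

-- the one-pass index: positions[c] is exactly the list of i in range(n) with colors[i] = c
lemma pv_positions_getD (n : Int) (colors : List Int) (c : Int) :
    (pvB_positions n colors).getD c [] =
      (PySem.List.pyRange 0 n 1).filter (fun i => PySem.List.pyGetD colors i 0 == c) := by
  have hfm : (PySem.List.pyRange 0 n 1).foldl
      (fun d i => PySem.Dict.modify d (PySem.List.pyGetD colors i 0) [] (fun l => l ++ [i]))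
      PySem.Dict.empty
      = ((PySem.List.pyRange 0 n 1).map (fun i => (PySem.List.pyGetD colors i 0, i))).foldl
        (fun d p => PySem.Dict.modify d p.1 [] (fun l => l ++ [p.2])) PySem.Dict.empty :=
    (List.foldl_map (f := fun i => (PySem.List.pyGetD colors i 0, i))
      (g := fun d p => PySem.Dict.modify d p.1 [] (fun l => l ++ [p.2]))
      (l := PySem.List.pyRange 0 n 1) (init := PySem.Dict.empty)).symm
  unfold pvB_positions
  rw [hfm, PySem.Dict.getD_foldl_modify_append]
  simp [List.filter_map, Function.comp_def]

-- per distinct color, A's scan of the street equals B's segment walk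
lemma pv_percolor (n k : Int) (colors : List Int) (c : Int) (hk : 0 < n → 1 ≤ k) :
    pvA_scan n k colors c n.toNat 0 0 =
      pvB_walk k ((pvB_positions n colors).getD c [] ++ [n]) (-1) 0 0 := by
  rw [pv_positions_getD]
  by_cases hn : n ≤ 0
  · rw [PySem.List.pyRange_one_eq_nil hn]
    rw [show n.toNat = 0 from by omega]
    simp [pvA_scan, pvB_walk]
    intro h
    omega
  · have hn' : 0 < n := by omega
    have hmain := pvB_walk_eq_scan n k colors c (hk hn')
      ((PySem.List.pyRange 0 n 1).filter (fun i => PySem.List.pyGetD colors i 0 == c) ++ [n])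
      (-1) 0 0
      (by
        intro x hx
        rcases List.mem_append.mp hx with h | h
        · have := PySem.List.mem_pyRange_one.mp (List.mem_filter.mp h).1
          omega
        · simp at h; omega)
      (by
        refine List.pairwise_append.mpr ⟨(PySem.List.pairwise_lt_pyRange_one 0 n).filter _, ?_, ?_⟩
        · simp
        · intro x hx y hy
          have := PySem.List.mem_pyRange_one.mp (List.mem_filter.mp hx).1
          simp at hy; omega)
      (by simp)
      (by
        intro j hj1 hj2
        simp only [List.mem_append, List.mem_filter, PySem.List.mem_pyRange_one,
          List.mem_singleton, beq_iff_eq]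
        constructor
        · rintro (⟨_, h⟩ | h)
          · exact h
          · omega
        · intro h
          exact Or.inl ⟨⟨by omega, by omega⟩, h⟩)
    rw [← hmain]
    norm_num

-- ===== VERDICT (by name: the statement is the Claim_ definition above) =====
theorem min_days_to_make_street_beautiful_spec : Claim_equal_min_days_to_make_street_beautiful := by
  intro n k colors _hdom hpre
  unfold Spec_min_days_to_make_street_beautiful
  unfold min_days_to_make_street_beautiful min_days_to_make_street_beautiful_alt
  by_cases hk1 : k = 1
  · simp [hk1]
  · have hk2 : 0 < n → 1 ≤ k := by
      intro hn0
      rcases hpre with ⟨h, _⟩ | ⟨_, h⟩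
      · exact absurd h hk1
      · have := h hn0; omega
    simp only [beq_iff_eq, if_neg hk1]
    refine PySem.List.foldl_congr_mem (PySem.Set.ofList colors)
      (fun min_days color => min min_days (pvA_scan n k colors color n.toNat 0 0))
      (fun min_days color => min min_days (pvB_walk k ((pvB_positions n colors).getD color [] ++ [n]) (-1) 0 0))
      (10 ^ 5) ?_
    intro acc c _hc
    simp only []
    rw [pv_percolor n k colors c hk2]
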